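-- pv_equiv track=rewrite | github.com/H0R4T1U/Babes-Fundamentele-Programarii | Săptămâna 3/Lab3/tema/main.py | sir_max
-- ===== SOURCE A (Python) =====
-- def sir_max(a):
--     # Gaseste cea mai mare secventa de nr crescatoare
--     longest_so_far = 1
--     longest_cur = 1
--     index_so_far = 0
--     index_cur = -1
--     for i in range(len(a)-1):
--         j = i+1
--         while j <= (len(a) -1) and a[j] > a[j-1]  :
--             if longest_cur == 1:
--                 index_cur = i
--             longest_cur+= 1
--             j+=1
--
--
--         if longest_cur > longest_so_far:
--             longest_so_far = longest_cur
--             index_so_far = index_cur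
--         longest_cur = 1
--     return a[index_so_far:index_so_far + longest_so_far]
-- ===== SOURCE B (Python) =====
-- def sir_max(a):
--     # Single linear pass: track the current strictly-increasing run and keep
--     # the first run that becomes strictly longer than the best so far.
--     best_start, best_len = 0, 1
--     cur_start, cur_len = 0, 1
--     for k in range(1, len(a)):
--         if a[k] > a[k - 1]:
--             cur_len += 1
--         else:
--             cur_start, cur_len = k, 1
--         if cur_len > best_len:
--             best_start, best_len = cur_start, cur_len
--     return a[best_start:best_start + best_len]
-- ===== Notes on version B (the rewrite author's own statement) =====
-- stated objective: faster
-- what changed: Replaced the quadratic rescan (for each index, an inner while re-walks the whole increasing run ahead of it) by a single linear pass that maintains the current run's start/length and keeps the first strictly-longer run.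
import Mathlib
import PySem

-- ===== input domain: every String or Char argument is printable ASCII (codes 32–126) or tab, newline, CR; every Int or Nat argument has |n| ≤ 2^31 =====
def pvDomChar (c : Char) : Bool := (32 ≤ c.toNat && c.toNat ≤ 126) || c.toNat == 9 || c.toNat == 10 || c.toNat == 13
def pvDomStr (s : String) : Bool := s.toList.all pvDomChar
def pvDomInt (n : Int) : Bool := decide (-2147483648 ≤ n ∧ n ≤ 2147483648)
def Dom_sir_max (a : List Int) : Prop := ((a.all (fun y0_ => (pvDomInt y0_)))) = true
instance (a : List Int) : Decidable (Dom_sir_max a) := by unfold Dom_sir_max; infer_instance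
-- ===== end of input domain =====

-- B replaces A's quadratic per-index rescan of the increasing run by a single
-- linear pass tracking the current run's start/length (first longest run kept).


-- ===== PORT A =====
-- inner 'while j <= len(a)-1 and a[j] > a[j-1]' loop; fuel-bounded (fuel = len(a) suffices)
def sirMaxWhile (a : List Int) : Nat → Int → Int → Int → Int → Int × Int × Int
  | 0, j, _i, lc, ic => (j, lc, ic)
  | fuel+1, j, i, lc, ic =>
    if j ≤ (a.length : Int) - 1 ∧ PySem.List.pyGetD a (j-1) 0 < PySem.List.pyGetD a j 0 then
      sirMaxWhile a fuel (j+1) i (lc+1) (if lc = 1 then i else ic)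
    else (j, lc, ic)

def sir_max (a : List Int) : List Int :=
  -- state (longest_so_far, longest_cur, index_so_far, index_cur)
  let st := (PySem.List.pyRange 0 ((a.length : Int) - 1) 1).foldl
    (fun (s : Int × Int × Int × Int) i =>
      let r := sirMaxWhile a a.length (i+1) i s.2.1 s.2.2.2
      if s.1 < r.2.1 then (r.2.1, 1, r.2.2, r.2.2) else (s.1, 1, s.2.2.1, r.2.2))
    (1, 1, 0, -1)
  PySem.List.slice a (some st.2.2.1) (some (st.2.2.1 + st.1))

-- ===== PORT B =====
def sir_max_alt (a : List Int) : List Int :=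
  -- state (best_start, best_len, cur_start, cur_len)
  let st := (PySem.List.pyRange 1 (a.length : Int) 1).foldl
    (fun (s : Int × Int × Int × Int) k =>
      let c : Int × Int :=
        if PySem.List.pyGetD a (k-1) 0 < PySem.List.pyGetD a k 0
        then (s.2.2.1, s.2.2.2 + 1) else (k, 1)
      if s.2.1 < c.2 then (c.1, c.2, c.1, c.2) else (s.1, s.2.1, c.1, c.2))
    (0, 1, 0, 1)
  PySem.List.slice a (some st.1) (some (st.1 + st.2.1))

-- ===== PRECONDITION & SPEC =====
def Spec_sir_max (a : List Int) (out : List Int) : Prop := out = sir_max_alt a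
instance (a : List Int) (out : List Int) : Decidable (Spec_sir_max a out) := by unfold Spec_sir_max; infer_instance

-- ===== CLAIM (what is proved, stated in full; the proofs are below) =====
def Claim_equal_sir_max : Prop := ∀ (a : List Int), Dom_sir_max a → Spec_sir_max a (sir_max a)

-- ===== LEMMAS AND PROOFS =====

-- 'the step into position k goes up' : k is a valid index and a[k-1] < a[k] (meaningful for k ≥ 1)
def up (a : List Int) (k : Nat) : Bool :=
  decide (k < a.length) && decide (a[k-1]?.getD 0 < a[k]?.getD 0)

-- length of the strictly increasing run starting at index i (0 if i out of range)
def fwd (a : List Int) (i : Nat) : Nat :=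
  if h : i < a.length then
    (if h2 : up a (i+1) = true then fwd a (i+1) + 1 else 1)
  else 0
termination_by a.length - i
decreasing_by
  simp only [up, Bool.and_eq_true, decide_eq_true_eq] at h2
  omega

-- length of the strictly increasing run ending at index k (0 if out of range)
def bwd (a : List Int) : Nat → Nat
  | 0 => if 0 < a.length then 1 else 0
  | k+1 => if k+1 < a.length then (if up a (k+1) then bwd a k + 1 else 1) else 0

-- mirrors of A's fold state: max of fwd over i < t (at least 1) and first argmax
def Mf (a : List Int) : Nat → Nat
  | 0 => 1
  | t+1 => if Mf a t < fwd a t then fwd a t else Mf a t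

def If (a : List Int) : Nat → Nat
  | 0 => 0
  | t+1 => if Mf a t < fwd a t then t else If a t

def Ic (a : List Int) : Nat → Int
  | 0 => -1
  | t+1 => if 2 ≤ fwd a t then (t : Int) else Ic a t

-- mirrors of B's fold state over indices 1..t
def Bl (a : List Int) : Nat → Nat
  | 0 => 1
  | t+1 => if Bl a t < bwd a (t+1) then bwd a (t+1) else Bl a t

def Bs (a : List Int) : Nat → Nat
  | 0 => 0
  | t+1 => if Bl a t < bwd a (t+1) then (t+1) + 1 - bwd a (t+1) else Bs a t

-- ---- basic facts about up / fwd / bwd ----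

theorem up_lt {a : List Int} {k : Nat} (h : up a k = true) : k < a.length := by
  simp only [up, Bool.and_eq_true, decide_eq_true_eq] at h; exact h.1

theorem up_zero (a : List Int) : up a 0 = false := by
  simp [up]

theorem fwd_pos_iff (a : List Int) (i : Nat) : 1 ≤ fwd a i ↔ i < a.length := by
  rw [fwd]; split_ifs <;> simp_all <;> omega

theorem fwd_le (a : List Int) : ∀ d i, a.length - i ≤ d → fwd a i ≤ a.length - i := by
  intro d
  induction d with
  | zero => intro i h; rw [fwd]; split_ifs <;> omega
  | succ d ih =>
    intro i h
    rw [fwd]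
    split_ifs with h1 h2
    · have := up_lt h2
      have := ih (i+1) (by omega)
      omega
    · omega
    · omega

theorem fwd_le' (a : List Int) (i : Nat) : fwd a i ≤ a.length - i :=
  fwd_le a (a.length - i) i le_rfl

theorem fwd_succ_of_up {a : List Int} {i : Nat} (h : up a (i+1) = true) :
    fwd a i = fwd a (i+1) + 1 := by
  have h1 : i < a.length := by have := up_lt h; omega
  rw [fwd]; simp [h1, h]

theorem fwd_le_one_of_not_up {a : List Int} {i : Nat} (h : up a (i+1) = false) :
    fwd a i ≤ 1 := by
  rw [fwd]; split_ifs with h1 h2 <;> simp_all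

theorem fwd_two_iff (a : List Int) (i : Nat) : 2 ≤ fwd a i ↔ up a (i+1) = true := by
  constructor
  · intro h
    by_contra hc
    have := fwd_le_one_of_not_up (a := a) (i := i) (by simpa using hc)
    omega
  · intro h
    have h1 := fwd_succ_of_up h
    have h2 := (fwd_pos_iff a (i+1)).2 (up_lt h)
    omega

theorem fwd_add_two_iff (a : List Int) (m i : Nat) :
    m + 2 ≤ fwd a i ↔ up a (i+1) = true ∧ m + 1 ≤ fwd a (i+1) := by
  rcases h : up a (i+1) with _ | _
  · have := fwd_le_one_of_not_up h
    simp; omega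
  · have := fwd_succ_of_up h
    simp; omega

theorem fwd_succ_iff (a : List Int) : ∀ m i, m + 2 ≤ fwd a i ↔ m + 1 ≤ fwd a i ∧ up a (i+m+1) = true := by
  intro m
  induction m with
  | zero =>
    intro i
    rw [fwd_two_iff]
    constructor
    · intro h; exact ⟨(fwd_pos_iff a i).2 (by have := up_lt h; omega), by simpa using h⟩
    · intro h; simpa using h.2
  | succ m ih =>
    intro i
    rw [fwd_add_two_iff, ih (i+1),
        show i+1+m+1 = i+(m+1)+1 by ring, ← and_assoc, ← fwd_add_two_iff]

theorem bwd_le (a : List Int) (k : Nat) : bwd a k ≤ k + 1 := by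
  induction k with
  | zero => rw [bwd]; split_ifs <;> omega
  | succ k ih => rw [bwd]; split_ifs <;> omega

theorem bwd_pos_iff (a : List Int) (k : Nat) : 1 ≤ bwd a k ↔ k < a.length := by
  cases k with
  | zero => rw [bwd]; split_ifs <;> omega
  | succ k => rw [bwd]; split_ifs <;> omega

theorem bwd_succ_of_up {a : List Int} {k : Nat} (h : up a (k+1) = true) :
    bwd a (k+1) = bwd a k + 1 := by
  rw [bwd]; simp [up_lt h, h]

theorem bwd_one_of_not_up {a : List Int} {k : Nat} (hk : k + 1 < a.length)
    (h : up a (k+1) = false) : bwd a (k+1) = 1 := by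
  rw [bwd]; simp [hk, h]

theorem bwd_add_two_iff (a : List Int) (m k : Nat) :
    m + 2 ≤ bwd a k ↔ up a k = true ∧ m + 1 ≤ bwd a (k-1) := by
  cases k with
  | zero =>
    have h1 := bwd_le a 0
    simp [up_zero]; omega
  | succ k =>
    rcases h : up a (k+1) with _ | _
    · by_cases hk : k + 1 < a.length
      · have := bwd_one_of_not_up hk h; simp; omega
      · have : bwd a (k+1) = 0 := by rw [bwd]; simp [hk]
        simp; omega
    · have := bwd_succ_of_up h
      simp; omega

theorem bridge (a : List Int) : ∀ m i, m + 1 ≤ fwd a i ↔ m + 1 ≤ bwd a (i+m) := by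
  intro m
  induction m with
  | zero => intro i; rw [fwd_pos_iff, bwd_pos_iff]; simp
  | succ m ih =>
    intro i
    rw [show m+1+1 = m+2 by ring, fwd_succ_iff, ih i, bwd_add_two_iff]
    have : i + (m+1) - 1 = i + m := by omega
    rw [this]
    constructor
    · rintro ⟨h1, h2⟩; exact ⟨by simpa using h2, h1⟩
    · rintro ⟨h1, h2⟩; exact ⟨h2, by simpa using h1⟩

-- ---- A's inner while loop computes the forward run length ----

theorem whileA (a : List Int) (i : Int) :
    ∀ fuel (j : Nat) (lc ic : Int), 1 ≤ j → 1 ≤ lc → fwd a (j-1) - 1 ≤ fuel →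
    sirMaxWhile a fuel (j : Int) i lc ic
      = ((j : Int) + ((fwd a (j-1) - 1 : Nat) : Int),
         lc + ((fwd a (j-1) - 1 : Nat) : Int),
         if 2 ≤ fwd a (j-1) ∧ lc = 1 then i else ic) := by
  intro fuel
  induction fuel with
  | zero =>
    intro j lc ic hj hlc hfuel
    have h0 : fwd a (j-1) - 1 = 0 := by omega
    have h2 : ¬ (2 ≤ fwd a (j-1) ∧ lc = 1) := by omega
    simp [sirMaxWhile, h0, h2]
  | succ fuel ih =>
    intro j lc ic hj hlc hfuel
    have hcond : ((j : Int) ≤ (a.length : Int) - 1 ∧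
        PySem.List.pyGetD a ((j:Int)-1) 0 < PySem.List.pyGetD a (j:Int) 0) ↔ up a j = true := by
      have hc : ((j:Int) - 1) = (((j-1 : Nat) : Int)) := by omega
      rw [hc]
      simp only [PySem.List.pyGetD_natCast, List.getD_eq_getElem?_getD, up,
        Bool.and_eq_true, decide_eq_true_eq]
      constructor
      · rintro ⟨h1, h2⟩; exact ⟨by omega, h2⟩
      · rintro ⟨h1, h2⟩; exact ⟨by omega, h2⟩
    rw [sirMaxWhile]
    rcases hup : up a j with _ | _
    · rw [if_neg (by rw [hcond, hup]; simp)]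
      have hle : fwd a (j-1) ≤ 1 := by
        have : (j - 1) + 1 = j := by omega
        have := fwd_le_one_of_not_up (a := a) (i := j-1) (by rw [this]; exact hup)
        omega
      have h0 : fwd a (j-1) - 1 = 0 := by omega
      have h2 : ¬ (2 ≤ fwd a (j-1) ∧ lc = 1) := by omega
      simp [h0, h2]
    · rw [if_pos (hcond.2 hup)]
      have hjj : (j - 1) + 1 = j := by omega
      have hstep : fwd a (j-1) = fwd a j + 1 := by
        have := fwd_succ_of_up (a := a) (i := j-1) (by rw [hjj]; exact hup)
        rw [hjj] at this; exact this
      have hpos : 1 ≤ fwd a j := (fwd_pos_iff a j).2 (up_lt hup)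
      have hj1 : ((j : Int) + 1) = (((j+1 : Nat) : Int)) := by omega
      have hs : (j+1 : Nat) - 1 = j := by omega
      have hfuel' : fwd a ((j+1) - 1) - 1 ≤ fuel := by rw [hs]; omega
      rw [hj1, ih (j+1) (lc+1) (if lc = 1 then i else ic) (by omega) (by omega) hfuel']
      rw [hs]
      have hnot : ¬ (2 ≤ fwd a j ∧ lc + 1 = 1) := by omega
      rw [if_neg hnot]
      simp only [Prod.mk.injEq]
      refine ⟨by omega, by omega, ?_⟩
      by_cases hl : lc = 1
      · rw [if_pos hl, if_pos ⟨by omega, hl⟩]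
      · rw [if_neg hl, if_neg (by tauto)]

theorem Mf_pos (a : List Int) (t : Nat) : 1 ≤ Mf a t := by
  induction t with
  | zero => simp [Mf]
  | succ t ih => rw [Mf]; split_ifs <;> omega

theorem Bl_pos (a : List Int) (t : Nat) : 1 ≤ Bl a t := by
  induction t with
  | zero => simp [Bl]
  | succ t ih => rw [Bl]; split_ifs <;> omega

-- ---- A's outer fold reaches state (Mf, 1, If, _) ----

theorem foldA (a : List Int) : ∀ t, t ≤ a.length →
    (List.range t).foldl
      (fun (s : Int × Int × Int × Int) (k : Nat) =>
        let r := sirMaxWhile a a.length ((k : Int)+1) (k : Int) s.2.1 s.2.2.2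
        if s.1 < r.2.1 then (r.2.1, 1, r.2.2, r.2.2) else (s.1, 1, s.2.2.1, r.2.2))
      (1, 1, 0, -1)
      = ((Mf a t : Int), 1, (If a t : Int), Ic a t) := by
  intro t
  induction t with
  | zero => intro _; simp [Mf, If, Ic]
  | succ t ih =>
    intro ht
    rw [List.range_succ, List.foldl_append, ih (by omega)]
    simp only [List.foldl_cons, List.foldl_nil]
    have htl : t < a.length := by omega
    have hj1 : ((t : Int) + 1) = (((t+1 : Nat) : Int)) := by omega
    rw [hj1, whileA a t a.length (t+1) 1 (Ic a t) (by omega) (by omega)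
          (by have := fwd_le' a ((t+1)-1); omega)]
    have hs : (t+1 : Nat) - 1 = t := by omega
    rw [hs]
    have hfp : 1 ≤ fwd a t := (fwd_pos_iff a t).2 htl
    have hlc : (1 : Int) + ((fwd a t - 1 : Nat) : Int) = ((fwd a t : Nat) : Int) := by omega
    simp only [hlc]
    by_cases hlt : Mf a t < fwd a t
    · have h2 : 2 ≤ fwd a t := by have := Mf_pos a t; omega
      rw [if_pos (by exact_mod_cast hlt)]
      rw [Mf, If, Ic, if_pos hlt, if_pos hlt, if_pos h2]
      simp only [Prod.mk.injEq]
      refine ⟨trivial, trivial, ?_, ?_⟩ <;>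
      · split_ifs with h1
        · rfl
        · exact absurd ⟨h2, by trivial⟩ h1
    · rw [if_neg (by exact_mod_cast hlt)]
      rw [Mf, If, Ic, if_neg hlt, if_neg hlt]
      simp only [Prod.mk.injEq]
      refine ⟨trivial, trivial, trivial, ?_⟩
      split_ifs with h1 h2 h3
      · rfl
      · exact absurd h1.1 h2
      · exact absurd ⟨h3, by trivial⟩ h1
      · rfl

-- ---- B's fold reaches state (Bs, Bl, cur_start, cur_len) ----

theorem foldB (a : List Int) (hlen : 1 ≤ a.length) :
    ∀ t, t ≤ a.length - 1 →
    (List.range t).foldl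
      (fun (s : Int × Int × Int × Int) (k : Nat) =>
        let c : Int × Int :=
          if PySem.List.pyGetD a ((1 + (k:Int))-1) 0 < PySem.List.pyGetD a (1 + (k:Int)) 0
          then (s.2.2.1, s.2.2.2 + 1) else (1 + (k:Int), 1)
        if s.2.1 < c.2 then (c.1, c.2, c.1, c.2) else (s.1, s.2.1, c.1, c.2))
      (0, 1, 0, 1)
      = ((Bs a t : Int), (Bl a t : Int), ((t + 1 - bwd a t : Nat) : Int), ((bwd a t : Nat) : Int)) := by
  intro t
  induction t with
  | zero =>
    intro _
    have h0 : bwd a 0 = 1 := by rw [bwd, if_pos (by omega)]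
    simp [Bs, Bl, h0]
  | succ t ih =>
    intro ht
    rw [List.range_succ, List.foldl_append, ih (by omega)]
    simp only [List.foldl_cons, List.foldl_nil]
    have htl : t + 1 < a.length := by omega
    have hcast : (1 + (t:Int)) = (((t+1 : Nat) : Int)) := by omega
    have hcast1 : ((1 + (t:Int)) - 1) = ((t : Nat) : Int) := by omega
    rw [hcast1, hcast]
    simp only [PySem.List.pyGetD_natCast, List.getD_eq_getElem?_getD]
    have hbp : 1 ≤ bwd a t := (bwd_pos_iff a t).2 (by omega)
    have hble : bwd a t ≤ t + 1 := bwd_le a t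
    have hupiff : (a[t]?.getD 0 < a[t+1]?.getD 0) ↔ up a (t+1) = true := by
      simp only [up, Bool.and_eq_true, decide_eq_true_eq]
      constructor
      · intro h; exact ⟨htl, by simpa using h⟩
      · intro h; simpa using h.2
    rcases hup : up a (t+1) with _ | _
    · have hc : ¬ (a[t]?.getD 0 < a[t+1]?.getD 0) := fun hc => by
        rw [hupiff.1 hc] at hup; cases hup
      have hb1 : bwd a (t+1) = 1 := bwd_one_of_not_up htl hup
      have hnb : ¬ ((Bl a t : Int) < (1:Int)) := by
        have := Bl_pos a t; omega
      simp only [if_neg hc, if_neg hnb]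
      rw [Bl, Bs, if_neg (by omega), if_neg (by omega), hb1]
      simp only [Prod.mk.injEq]
      refine ⟨?_, ?_, ?_, ?_⟩ <;> first | trivial | omega
    · have hc : a[t]?.getD 0 < a[t+1]?.getD 0 := hupiff.2 hup
      have hb1 : bwd a (t+1) = bwd a t + 1 := bwd_succ_of_up hup
      by_cases hbl : Bl a t < bwd a (t+1)
      · have hbl' : (Bl a t : Int) < ((bwd a t : Nat) : Int) + 1 := by
          rw [hb1] at hbl; omega
        simp only [if_pos hc, if_pos hbl']
        rw [Bl, Bs, if_pos hbl, if_pos hbl, hb1]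
        simp only [Prod.mk.injEq]
        refine ⟨?_, ?_, ?_, ?_⟩ <;> first | trivial | omega
      · have hbl' : ¬ ((Bl a t : Int) < ((bwd a t : Nat) : Int) + 1) := by
          rw [hb1] at hbl; omega
        simp only [if_pos hc, if_neg hbl']
        rw [Bl, Bs, if_neg hbl, if_neg hbl, hb1]
        simp only [Prod.mk.injEq]
        refine ⟨?_, ?_, ?_, ?_⟩ <;> first | trivial | omega

-- ---- characterization of the fold states: maximum and first argmax ----

theorem Mf_ge (a : List Int) : ∀ t i, i < t → fwd a i ≤ Mf a t := by
  intro t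
  induction t with
  | zero => intro i h; omega
  | succ t ih =>
    intro i h
    rw [Mf]
    rcases Nat.lt_succ_iff_lt_or_eq.1 h with h' | h'
    · have := ih i h'; split_ifs <;> omega
    · subst h'; split_ifs <;> omega

theorem Mf_cases (a : List Int) : ∀ t, Mf a t = 1 ∨ ∃ i, i < t ∧ fwd a i = Mf a t := by
  intro t
  induction t with
  | zero => left; rfl
  | succ t ih =>
    rw [Mf]
    split_ifs with hl
    · right; exact ⟨t, by omega, rfl⟩
    · rcases ih with h | ⟨i, hi, hfi⟩
      · left; exact h
      · right; exact ⟨i, by omega, hfi⟩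

theorem If_spec (a : List Int) : ∀ t,
    (∀ i, i < If a t → fwd a i < Mf a t) ∧
    (2 ≤ Mf a t → If a t < t ∧ fwd a (If a t) = Mf a t) ∧
    (Mf a t = 1 → If a t = 0) := by
  intro t
  induction t with
  | zero =>
    refine ⟨fun i h => by simp [If] at h, fun h => by simp [Mf] at h, fun _ => rfl⟩
  | succ t ih =>
    obtain ⟨h1, h2, h3⟩ := ih
    rw [Mf, If]
    split_ifs with hl
    · refine ⟨fun i hi => lt_of_le_of_lt (Mf_ge a t i hi) hl, fun _ => ⟨by omega, rfl⟩, ?_⟩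
      intro hc; have := Mf_pos a t; omega
    · exact ⟨h1, fun hm => ⟨by have := (h2 hm).1; omega, (h2 hm).2⟩, h3⟩

theorem Bl_ge (a : List Int) : ∀ t k, k ≤ t → bwd a k ≤ Bl a t := by
  intro t
  induction t with
  | zero =>
    intro k h
    have h0 : k = 0 := by omega
    subst h0
    have := bwd_le a 0
    simp [Bl]; omega
  | succ t ih =>
    intro k h
    rw [Bl]
    rcases Nat.le_succ_iff_eq_or_le.1 h with h' | h'
    · subst h'; simp only [Nat.succ_eq_add_one]; split_ifs <;> omega
    · have := ih k h'; split_ifs <;> omega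

theorem Bl_cases (a : List Int) : ∀ t, Bl a t = 1 ∨ ∃ k, k ≤ t ∧ bwd a k = Bl a t := by
  intro t
  induction t with
  | zero => left; rfl
  | succ t ih =>
    rw [Bl]
    split_ifs with hl
    · right; exact ⟨t+1, le_refl _, rfl⟩
    · rcases ih with h | ⟨k, hk, hbk⟩
      · left; exact h
      · right; exact ⟨k, by omega, hbk⟩

theorem Bs_spec (a : List Int) : ∀ t,
    (2 ≤ Bl a t → ∃ k, k ≤ t ∧ bwd a k = Bl a t ∧
      (∀ k', k' < k → bwd a k' < Bl a t) ∧ Bs a t = k + 1 - Bl a t) ∧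
    (Bl a t = 1 → Bs a t = 0) := by
  intro t
  induction t with
  | zero => refine ⟨fun h => by simp [Bl] at h, fun _ => rfl⟩
  | succ t ih =>
    obtain ⟨h1, h2⟩ := ih
    rw [Bl, Bs]
    split_ifs with hl
    · refine ⟨fun _ => ⟨t+1, le_refl _, rfl, fun k' hk' => ?_, by omega⟩, fun hc => ?_⟩
      · have := Bl_ge a t k' (by omega); omega
      · have := Bl_pos a t; omega
    · refine ⟨fun hm => ?_, h2⟩
      obtain ⟨k, hk, he, hmin, hbs⟩ := h1 hm
      exact ⟨k, by omega, he, hmin, hbs⟩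

-- ---- the two characterizations coincide: same maximum, same first start ----

theorem max_eq (a : List Int) (h : 1 ≤ a.length) :
    Mf a (a.length - 1) = Bl a (a.length - 1) := by
  apply le_antisymm
  · rcases Mf_cases a (a.length - 1) with h1 | ⟨i, hi, hfi⟩
    · rw [h1]; exact Bl_pos a (a.length - 1)
    · have hm1 : 1 ≤ Mf a (a.length - 1) := Mf_pos a (a.length - 1)
      have hb := (bridge a (Mf a (a.length - 1) - 1) i).1 (by omega)
      have hle := fwd_le' a i
      have := Bl_ge a (a.length - 1) (i + (Mf a (a.length - 1) - 1)) (by omega)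
      omega
  · rcases Bl_cases a (a.length - 1) with h1 | ⟨k, hk, hbk⟩
    · rw [h1]; exact Mf_pos a (a.length - 1)
    · have hbl1 : 1 ≤ Bl a (a.length - 1) := Bl_pos a (a.length - 1)
      have hmp : 1 ≤ Mf a (a.length - 1) := Mf_pos a (a.length - 1)
      by_cases h2 : 2 ≤ Bl a (a.length - 1)
      · have hkb := bwd_le a k
        have hik : (k + 1 - Bl a (a.length - 1)) + (Bl a (a.length - 1) - 1) = k := by omega
        have hf := (bridge a (Bl a (a.length - 1) - 1) (k + 1 - Bl a (a.length - 1))).2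
          (by rw [hik]; omega)
        have hup : up a ((k + 1 - Bl a (a.length - 1)) + 1) = true :=
          (fwd_two_iff a _).1 (by omega)
        have hin : (k + 1 - Bl a (a.length - 1)) < a.length - 1 := by
          have := up_lt hup; omega
        have := Mf_ge a (a.length - 1) _ hin
        omega
      · omega

theorem arg_eq (a : List Int) (h : 1 ≤ a.length) :
    If a (a.length - 1) = Bs a (a.length - 1) := by
  have hmb := max_eq a h
  by_cases h2 : 2 ≤ Mf a (a.length - 1)
  · obtain ⟨hIlt, hIf⟩ := (If_spec a (a.length - 1)).2.1 h2
    have hImin := (If_spec a (a.length - 1)).1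
    obtain ⟨k, hk, hbk, hmin, hbs⟩ := (Bs_spec a (a.length - 1)).1 (by omega)
    have hb := (bridge a (Mf a (a.length - 1) - 1) (If a (a.length - 1))).1 (by omega)
    have hk1 : k ≤ If a (a.length - 1) + (Mf a (a.length - 1) - 1) := by
      by_contra hcon
      have := hmin (If a (a.length - 1) + (Mf a (a.length - 1) - 1)) (by omega)
      omega
    have hkb := bwd_le a k
    have hik : (k + 1 - Mf a (a.length - 1)) + (Mf a (a.length - 1) - 1) = k := by omega
    have hf := (bridge a (Mf a (a.length - 1) - 1) (k + 1 - Mf a (a.length - 1))).2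
      (by rw [hik]; omega)
    have hI2 : If a (a.length - 1) ≤ k + 1 - Mf a (a.length - 1) := by
      by_contra hcon
      have := hImin (k + 1 - Mf a (a.length - 1)) (by omega)
      omega
    omega
  · have := Mf_pos a (a.length - 1)
    rw [(If_spec a (a.length - 1)).2.2 (by omega), (Bs_spec a (a.length - 1)).2 (by omega)]

-- ===== VERDICT (by name: the statement is the Claim_ definition above) =====
theorem sir_max_spec : Claim_equal_sir_max := by
  intro a _
  unfold Spec_sir_max
  by_cases hn : a.length = 0
  · have ha : a = [] := List.eq_nil_of_length_eq_zero hn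
    subst ha; decide
  · have h1 : 1 ≤ a.length := by omega
    show sir_max a = sir_max_alt a
    unfold sir_max sir_max_alt
    have hA : PySem.List.pyRange 0 ((a.length : Int) - 1) 1
        = (List.range (a.length - 1)).map (fun k : Nat => (k : Int)) := by
      rw [PySem.List.pyRange_one]
      have hx : (((a.length : Int) - 1) - 0).toNat = a.length - 1 := by omega
      rw [hx]; simp
    have hB : PySem.List.pyRange 1 (a.length : Int) 1
        = (List.range (a.length - 1)).map (fun k : Nat => 1 + (k : Int)) := by
      rw [PySem.List.pyRange_one]
      have hx : ((a.length : Int) - 1).toNat = a.length - 1 := by omega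
      rw [hx]
    simp only [hA, hB, List.foldl_map]
    rw [foldA a (a.length - 1) (by omega), foldB a h1 (a.length - 1) (by omega)]
    rw [max_eq a h1, arg_eq a h1]
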